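-- pv_equiv track=rewrite | github.com/sermuns/monkey-computer | assets/png_to_hex.py | hex_values_to_vhdl_array_elements
-- ===== SOURCE A (Python) =====
-- def hex_values_to_vhdl_array_elements(hex_values):
--     """
--     Given an array of hexadecimal values, return a string that can be pasted
--     into a VHDL file as an array of elements.
--     Two hex values are combined into a single element, separated by a _.
--     """
--
--     # Create the string
--     vhdl_array_elements = ''
--     for i, hex_value in enumerate(hex_values):
--         if i % 2 == 0:
--             vhdl_array_elements += f'x"{hex_value}'
--         else: # second
--             vhdl_array_elements += f'_{hex_value}",\n'
--
--     return vhdl_array_elements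
-- ===== SOURCE B (Python) =====
-- def hex_values_to_vhdl_array_elements(hex_values):
--     pieces = []
--     for i in range(0, len(hex_values), 2):
--         if i + 1 < len(hex_values):
--             pieces.append(f'x"{hex_values[i]}_{hex_values[i + 1]}",\n')
--         else:
--             pieces.append(f'x"{hex_values[i]}')
--     return ''.join(pieces)
-- ===== Notes on version B (the rewrite author's own statement) =====
-- stated objective: alternative
-- what changed: B walks the list two values per iteration, emitting one complete element string per pair (plus a dangling piece for an odd tail) and joining the pieces at the end, instead of A's per-element loop toggling on index parity with string accumulation.
import Mathlib
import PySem

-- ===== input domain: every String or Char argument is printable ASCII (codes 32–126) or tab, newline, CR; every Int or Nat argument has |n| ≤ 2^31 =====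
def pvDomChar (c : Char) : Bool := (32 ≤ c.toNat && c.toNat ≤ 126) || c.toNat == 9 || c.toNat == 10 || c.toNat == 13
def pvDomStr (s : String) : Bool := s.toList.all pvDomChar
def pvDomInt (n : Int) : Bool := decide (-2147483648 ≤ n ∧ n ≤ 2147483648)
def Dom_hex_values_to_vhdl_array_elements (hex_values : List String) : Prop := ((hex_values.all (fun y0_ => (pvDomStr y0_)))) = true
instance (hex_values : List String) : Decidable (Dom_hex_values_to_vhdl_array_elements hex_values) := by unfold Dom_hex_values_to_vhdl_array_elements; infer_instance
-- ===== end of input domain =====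

-- B iterates over PAIRS, emitting one complete piece per pair and joining at the end,
-- instead of A's per-element loop toggling on index parity; same cost ("alternative").

-- ===== PORT A =====
-- A's loop: index-and-accumulator fold over the list, branching on i % 2.
def pvAGo (i : Nat) (acc : String) : List String → String
  | [] => acc
  | h :: t =>
    if i % 2 = 0 then pvAGo (i + 1) (acc ++ "x\"" ++ h) t
    else pvAGo (i + 1) (acc ++ "_" ++ h ++ "\",\n") t

def hex_values_to_vhdl_array_elements (hex_values : List String) : String :=
  pvAGo 0 "" hex_values

-- ===== PORT B =====
-- B's loop over i in range(0, len, 2): structurally, consume two elements per step.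
def pvBPieces : List String → List String
  | [] => []
  | [a] => ["x\"" ++ a]
  | a :: b :: t => ("x\"" ++ a ++ "_" ++ b ++ "\",\n") :: pvBPieces t

def hex_values_to_vhdl_array_elements_alt (hex_values : List String) : String :=
  String.join (pvBPieces hex_values)

-- ===== PRECONDITION & SPEC =====
def Spec_hex_values_to_vhdl_array_elements (hex_values : List String) (out : String) : Prop := out = hex_values_to_vhdl_array_elements_alt hex_values
instance (hex_values : List String) (out : String) : Decidable (Spec_hex_values_to_vhdl_array_elements hex_values out) := by unfold Spec_hex_values_to_vhdl_array_elements; infer_instance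

-- ===== CLAIM (what is proved, stated in full; the proofs are below) =====
def Claim_equal_hex_values_to_vhdl_array_elements : Prop := ∀ (hex_values : List String), Dom_hex_values_to_vhdl_array_elements hex_values → Spec_hex_values_to_vhdl_array_elements hex_values (hex_values_to_vhdl_array_elements hex_values)

-- ===== LEMMAS AND PROOFS =====
theorem pvFoldl_shift (l : List String) : ∀ (s : String),
    List.foldl (fun r t => r ++ t) s l = s ++ List.foldl (fun r t => r ++ t) "" l := by
  induction l with
  | nil => intro s; simp
  | cons h t ih =>
    intro s
    show List.foldl _ (s ++ h) t = s ++ List.foldl _ ("" ++ h) t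
    rw [ih (s ++ h), ih ("" ++ h)]
    simp [String.append_assoc]

theorem pvAGo_even (l : List String) : ∀ (i : Nat) (acc : String), i % 2 = 0 →
    pvAGo i acc l = acc ++ String.join (pvBPieces l) := by
  induction l using pvBPieces.induct with
  | case1 => intro i acc _; simp [pvAGo, pvBPieces, String.join]
  | case2 a =>
    intro i acc h
    rw [pvAGo, if_pos h, pvAGo]
    simp [pvBPieces, String.join, String.append_assoc]
  | case3 a b t ih =>
    intro i acc h
    rw [pvAGo, if_pos h, pvAGo, if_neg (by omega : ¬ (i + 1) % 2 = 0),
      ih (i + 1 + 1) _ (by omega)]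
    show _ = acc ++ String.join (("x\"" ++ a ++ "_" ++ b ++ "\",\n") :: pvBPieces t)
    conv_rhs => rw [String.join, List.foldl_cons, pvFoldl_shift (pvBPieces t)]
    simp [String.join, String.append_assoc]

-- ===== VERDICT (by name: the statement is the Claim_ definition above) =====
theorem hex_values_to_vhdl_array_elements_spec : Claim_equal_hex_values_to_vhdl_array_elements := by
  intro l _
  show _ = _
  unfold hex_values_to_vhdl_array_elements hex_values_to_vhdl_array_elements_alt
  rw [pvAGo_even l 0 "" rfl]
  simp
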